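-- pv_equiv track=rewrite | github.com/fpour/DGB | visualization/TET_plots.py | generate_edge_last_timestamp
-- ===== SOURCE A (Python) =====
-- def generate_edge_last_timestamp(edges_per_ts):
--     """generates a dictionary containing the last timestamp of each edge"""
--     edge_last_ts = {}
--     for ts, e_list in edges_per_ts.items():
--         for e in e_list:
--             if e not in edge_last_ts:
--                 edge_last_ts[e] = ts
--             else:
--                 edge_last_ts[e] = max(ts, edge_last_ts[e])
--     return edge_last_ts
-- ===== SOURCE B (Python) =====
-- def generate_edge_last_timestamp(edges_per_ts):
--     """generates a dictionary containing the last timestamp of each edge"""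
--     edges = []
--     for e_list in edges_per_ts.values():
--         for e in e_list:
--             if e not in edges:
--                 edges.append(e)
--     return {e: max(ts for ts, e_list in edges_per_ts.items() if e in e_list)
--             for e in edges}
-- ===== Notes on version B (the rewrite author's own statement) =====
-- stated objective: alternative
-- what changed: Instead of maintaining a result dict with an online conditional max-update, B first collects the distinct edges in first-occurrence order into a plain list and then builds the result with one max() over a per-edge scan of the timestamp buckets.
import Mathlib
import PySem

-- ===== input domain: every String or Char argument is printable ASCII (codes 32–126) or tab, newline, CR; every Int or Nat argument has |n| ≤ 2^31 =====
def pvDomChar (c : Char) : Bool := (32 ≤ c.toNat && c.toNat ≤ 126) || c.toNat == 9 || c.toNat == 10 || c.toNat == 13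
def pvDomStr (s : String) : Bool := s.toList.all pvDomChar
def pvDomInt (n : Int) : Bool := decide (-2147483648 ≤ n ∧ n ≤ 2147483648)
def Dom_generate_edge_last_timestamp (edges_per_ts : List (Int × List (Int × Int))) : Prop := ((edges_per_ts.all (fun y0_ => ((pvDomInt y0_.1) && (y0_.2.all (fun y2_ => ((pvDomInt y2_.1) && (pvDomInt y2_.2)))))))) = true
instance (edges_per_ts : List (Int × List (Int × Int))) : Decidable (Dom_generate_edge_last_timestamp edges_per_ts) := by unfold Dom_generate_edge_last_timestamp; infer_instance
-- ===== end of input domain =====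

-- B drops A's online dict of running maxima: it dedups the edges into a plain list
-- (first-occurrence order) and then takes one max() per edge over the timestamp
-- buckets that contain it (objective: alternative, not faster).

-- ===== PORT A =====
def generate_edge_last_timestamp (edges_per_ts : List (Int × List (Int × Int))) : List (Int × Int × Int) :=
  (edges_per_ts.foldl
    (fun d p =>
      p.2.foldl
        (fun d e =>
          if d.contains e = false then d.insert e p.1
          else d.insert e (max p.1 (d.getD e 0)))    -- getD: key certainly present here
        d)
    (PySem.Dict.empty : PySem.Dict (Int × Int) Int)).items.map
    (fun q => (q.1.1, q.1.2, q.2))   -- dict[tuple,int] rendered as flat triples per the type convention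

-- ===== PORT B =====
def generate_edge_last_timestamp_alt (edges_per_ts : List (Int × List (Int × Int))) : List (Int × Int × Int) :=
  -- edges: distinct edges in first-occurrence order, as a plain list
  let edges : List (Int × Int) :=
    edges_per_ts.foldl
      (fun acc p => p.2.foldl (fun acc e => if e ∈ acc then acc else acc ++ [e]) acc) []
  -- dict comprehension: one max() per edge over the buckets containing it
  edges.map (fun e =>
    (e.1, e.2,
      (PySem.List.max?
        ((edges_per_ts.filter (fun p => decide (e ∈ p.2))).map (fun p => p.1))
        (fun y => y)).getD 0))   -- max(generator); the list is nonempty since e came from some bucket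

-- ===== PRECONDITION & SPEC =====
def Spec_generate_edge_last_timestamp (edges_per_ts : List (Int × List (Int × Int))) (out : List (Int × Int × Int)) : Prop := out = generate_edge_last_timestamp_alt edges_per_ts
instance (edges_per_ts : List (Int × List (Int × Int))) (out : List (Int × Int × Int)) : Decidable (Spec_generate_edge_last_timestamp edges_per_ts out) := by unfold Spec_generate_edge_last_timestamp; infer_instance

-- ===== CLAIM (what is proved, stated in full; the proofs are below) =====
def Claim_equal_generate_edge_last_timestamp : Prop := ∀ (edges_per_ts : List (Int × List (Int × Int))), Dom_generate_edge_last_timestamp edges_per_ts → Spec_generate_edge_last_timestamp edges_per_ts (generate_edge_last_timestamp edges_per_ts)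

-- ===== LEMMAS AND PROOFS =====

-- B's dedup of one bucket
def pvDedup (acc : List (Int × Int)) (es : List (Int × Int)) : List (Int × Int) :=
  es.foldl (fun acc e => if e ∈ acc then acc else acc ++ [e]) acc

-- B's list of distinct edges
def pvE (l : List (Int × List (Int × Int))) : List (Int × Int) :=
  l.foldl (fun acc p => pvDedup acc p.2) []

-- B's per-edge timestamp list and value
def pvTss (l : List (Int × List (Int × Int))) (e : Int × Int) : List Int :=
  (l.filter (fun p => decide (e ∈ p.2))).map (fun p => p.1)

def pvV (l : List (Int × List (Int × Int))) (e : Int × Int) : Int :=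
  (PySem.List.max? (pvTss l e) (fun y => y)).getD 0

-- A's dict fold
def pvStepA (ts : Int) (d : PySem.Dict (Int × Int) Int) (e : Int × Int) : PySem.Dict (Int × Int) Int :=
  if d.contains e = false then d.insert e ts else d.insert e (max ts (d.getD e 0))

def pvFoldA (l : List (Int × List (Int × Int))) : PySem.Dict (Int × Int) Int :=
  l.foldl (fun d p => p.2.foldl (pvStepA p.1) d) PySem.Dict.empty

lemma mem_pvDedup (es : List (Int × Int)) (acc : List (Int × Int)) (e : Int × Int) :
    e ∈ pvDedup acc es ↔ e ∈ acc ∨ e ∈ es := by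
  induction es generalizing acc with
  | nil => simp [pvDedup]
  | cons x t ih =>
      simp only [pvDedup, List.foldl_cons] at *
      by_cases hx : x ∈ acc
      · rw [if_pos hx, ih]
        constructor
        · rintro (h | h)
          · exact Or.inl h
          · exact Or.inr (List.mem_cons_of_mem _ h)
        · rintro (h | h)
          · exact Or.inl h
          · rcases List.mem_cons.mp h with h | h
            · exact Or.inl (h ▸ hx)
            · exact Or.inr h
      · rw [if_neg hx, ih]
        simp only [List.mem_append, List.mem_cons]
        tauto

lemma mem_pvE_aux (l : List (Int × List (Int × Int))) (acc : List (Int × Int)) (e : Int × Int) :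
    e ∈ l.foldl (fun acc p => pvDedup acc p.2) acc ↔ e ∈ acc ∨ ∃ p ∈ l, e ∈ p.2 := by
  induction l generalizing acc with
  | nil => simp
  | cons x t ih =>
      simp only [List.foldl_cons, ih, mem_pvDedup]
      constructor
      · rintro ((h | h) | ⟨p, hp, hpe⟩)
        · exact Or.inl h
        · exact Or.inr ⟨x, List.mem_cons_self, h⟩
        · exact Or.inr ⟨p, List.mem_cons_of_mem _ hp, hpe⟩
      · rintro (h | ⟨p, hp, hpe⟩)
        · exact Or.inl (Or.inl h)
        · rcases List.mem_cons.mp hp with h | h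
          · exact Or.inl (Or.inr (h ▸ hpe))
          · exact Or.inr ⟨p, h, hpe⟩

lemma mem_pvE (l : List (Int × List (Int × Int))) (e : Int × Int) :
    e ∈ pvE l ↔ ∃ p ∈ l, e ∈ p.2 := by
  rw [pvE, mem_pvE_aux]; simp

lemma pvKeysOf {d : PySem.Dict (Int × Int) Int} {E0 : List (Int × Int)} {v : (Int × Int) → Int}
    (h : d.items = E0.map (fun e => (e, v e))) : d.keys = E0 := by
  simp only [PySem.Dict.keys, h, List.map_map]
  have hid : ((fun x : (Int × Int) × Int => x.1) ∘ fun e => (e, v e)) = id := rfl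
  rw [hid, List.map_id]

lemma pvMaxAppend (ts : Int) (l : List Int) (hl : l ≠ []) :
    (PySem.List.max? (l ++ [ts]) (fun y => y)).getD 0
      = max ts ((PySem.List.max? l (fun y => y)).getD 0) := by
  cases l with
  | nil => exact absurd rfl hl
  | cons x t =>
      rw [List.cons_append, PySem.List.max?_id_cons, PySem.List.max?_id_cons]
      simp [List.foldl_append, max_comm]

-- the inner loop of A, characterised against B's dedup list
lemma pvInner (ts : Int) (es : List (Int × Int)) (E0 : List (Int × Int)) (v : (Int × Int) → Int)
    (d : PySem.Dict (Int × Int) Int) (hnd : E0.Nodup) (hit : d.items = E0.map (fun e => (e, v e))) :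
    (es.foldl (pvStepA ts) d).items
      = (pvDedup E0 es).map
          (fun e => (e, if e ∈ es then (if e ∈ E0 then max ts (v e) else ts) else v e))
      ∧ (pvDedup E0 es).Nodup := by
  induction es generalizing E0 v d with
  | nil =>
      refine ⟨?_, hnd⟩
      rw [List.foldl_nil, hit]
      apply List.map_congr_left
      intro e _
      simp
  | cons e t ih =>
      have hkeys : d.keys = E0 := pvKeysOf hit
      have hcont : d.contains e = decide (e ∈ E0) := by
        rw [PySem.Dict.contains_eq_decide_mem_keys, hkeys]
      by_cases he : e ∈ E0
      · -- existing key: in-place rewrite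
        have hgetD : d.getD e 0 = v e := by
          apply PySem.Dict.getD_of_mem_items
          · rw [hit]; exact List.mem_map.mpr ⟨e, he, rfl⟩
          · rw [hkeys]; exact hnd
        have hstep : pvStepA ts d e = d.insert e (max ts (v e)) := by
          unfold pvStepA
          rw [hcont, hgetD]
          simp [he]
        have hitems' : (d.insert e (max ts (v e))).items
            = E0.map (fun e' => (e', if e' = e then max ts (v e) else v e')) := by
          rw [PySem.Dict.items_insert_of_contains _ _ (by rw [hcont]; simp [he]), hit, List.map_map]
          apply List.map_congr_left
          intro e' _
          by_cases h1 : e' = e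
          · subst h1; simp
          · simp [h1]
        have hded : pvDedup E0 (e :: t) = pvDedup E0 t := by
          simp [pvDedup, List.foldl_cons, he]
        obtain ⟨hIH, hndIH⟩ := ih E0 (fun e' => if e' = e then max ts (v e) else v e')
          (d.insert e (max ts (v e))) hnd hitems'
        refine ⟨?_, hded ▸ hndIH⟩
        rw [List.foldl_cons, hstep, hIH, hded]
        apply List.map_congr_left
        intro e' _
        by_cases h1 : e' = e
        · subst h1
          by_cases h2 : e' ∈ t <;> simp [h2, he]
        · simp [h1]
      · -- fresh key: appended at the end
        have hstep : pvStepA ts d e = d.insert e ts := by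
          unfold pvStepA
          rw [hcont]
          simp [he]
        have hitems' : (d.insert e ts).items
            = (E0 ++ [e]).map (fun e' => (e', if e' = e then ts else v e')) := by
          rw [PySem.Dict.items_insert_of_not_contains _ _ (by rw [hcont]; simp [he]), hit,
            List.map_append]
          congr 1
          · apply List.map_congr_left
            intro e' he'
            have : e' ≠ e := fun h => he (h ▸ he')
            simp [this]
          · simp
        have hnd' : (E0 ++ [e]).Nodup := by
          simp [List.nodup_append, hnd]
          intro a b hab hax
          exact he (hax ▸ hab)
        have hded : pvDedup E0 (e :: t) = pvDedup (E0 ++ [e]) t := by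
          simp [pvDedup, List.foldl_cons, he]
        obtain ⟨hIH, hndIH⟩ := ih (E0 ++ [e]) (fun e' => if e' = e then ts else v e')
          (d.insert e ts) hnd' hitems'
        refine ⟨?_, hded ▸ hndIH⟩
        rw [List.foldl_cons, hstep, hIH, hded]
        apply List.map_congr_left
        intro e' _
        by_cases h1 : e' = e
        · subst h1
          by_cases h2 : e' ∈ t <;> simp [h2, he]
        · simp [h1]

lemma pvOuter (l : List (Int × List (Int × Int))) :
    (pvFoldA l).items = (pvE l).map (fun e => (e, pvV l e)) ∧ (pvE l).Nodup := by
  induction l using List.reverseRecOn with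
  | nil => exact ⟨rfl, List.Pairwise.nil⟩
  | append_singleton l x ihl =>
      obtain ⟨ih, ihnd⟩ := ihl
      have hfold : pvFoldA (l ++ [x]) = x.2.foldl (pvStepA x.1) (pvFoldA l) := by
        simp [pvFoldA, List.foldl_append]
      have hE : pvE (l ++ [x]) = pvDedup (pvE l) x.2 := by
        simp [pvE, List.foldl_append]
      obtain ⟨hIH, hndIH⟩ := pvInner x.1 x.2 (pvE l) (pvV l) (pvFoldA l) ihnd ih
      refine ⟨?_, hE ▸ hndIH⟩
      rw [hfold, hIH, hE]
      apply List.map_congr_left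
      intro e he
      have hTss : pvTss (l ++ [x]) e
          = pvTss l e ++ (if e ∈ x.2 then [x.1] else []) := by
        simp only [pvTss, List.filter_append, List.map_append]
        congr 1
        by_cases h : e ∈ x.2 <;> simp [List.filter, h]
      by_cases h2 : e ∈ x.2
      · by_cases h1 : e ∈ pvE l
        · -- seen before: value is max of ts and the old maximum
          have hne : pvTss l e ≠ [] := by
            obtain ⟨p, hp, hpe⟩ := (mem_pvE l e).mp h1
            simp only [pvTss, ne_eq, List.map_eq_nil_iff, List.filter_eq_nil_iff]
            intro hall
            exact (hall p hp) (by simpa using hpe)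
          have : pvV (l ++ [x]) e = max x.1 (pvV l e) := by
            rw [pvV, hTss, if_pos h2, pvMaxAppend _ _ hne]; rfl
          simp [h2, h1, this]
        · -- first appearance in this bucket: value is ts
          have hnil : pvTss l e = [] := by
            simp only [pvTss, List.map_eq_nil_iff, List.filter_eq_nil_iff]
            intro p hp hpe
            exact (fun h => h1 ((mem_pvE l e).mpr ⟨p, hp, by simpa using hpe⟩)) trivial
          have : pvV (l ++ [x]) e = x.1 := by
            rw [pvV, hTss, if_pos h2, hnil]
            simp [PySem.List.max?_id_cons]
          simp [h2, h1, this]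
      · -- bucket does not mention e: value unchanged
        have : pvV (l ++ [x]) e = pvV l e := by
          rw [pvV, hTss, if_neg h2, List.append_nil]; rfl
        simp [h2, this]

-- ===== VERDICT (by name: the statement is the Claim_ definition above) =====
theorem generate_edge_last_timestamp_spec : Claim_equal_generate_edge_last_timestamp := by
  intro l _
  unfold Spec_generate_edge_last_timestamp generate_edge_last_timestamp generate_edge_last_timestamp_alt
  have h := (pvOuter l).1
  have hA : (l.foldl
      (fun d p => p.2.foldl
        (fun d e => if d.contains e = false then d.insert e p.1
          else d.insert e (max p.1 (d.getD e 0))) d)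
      (PySem.Dict.empty : PySem.Dict (Int × Int) Int)) = pvFoldA l := rfl
  rw [hA, h, List.map_map]
  rfl
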